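-- pv_equiv track=rewrite | github.com/thegodseller/DuDe_Hawaiian | apps/agents/src/graph/core.py | order_messages
-- ===== SOURCE A (Python) =====
-- def order_messages(messages):
--     # Arrange keys in specified order
--     ordered_messages = []
--     for msg in messages:
--         ordered = {}
--         msg = {k: v for k, v in msg.items() if v is not None}
--         # Add keys in specified order if they exist
--         for key in ['role', 'sender', 'content', 'created_at', 'timestamp']:
--             if key in msg:
--                 ordered[key] = msg[key]
--         # Add remaining keys in alphabetical order
--         for key in sorted(msg.keys()):
--             if key not in ['role', 'sender', 'content', 'created_at', 'timestamp']:
--                 ordered[key] = msg[key]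
--         ordered_messages.append(ordered)
--
--     return ordered_messages
-- ===== SOURCE B (Python) =====
-- PRIORITY = ('role', 'sender', 'content', 'created_at', 'timestamp')
-- _RANK = {key: i for i, key in enumerate(PRIORITY)}
--
--
-- def order_messages(messages):
--     # One priority-aware sort: priority keys rank 0..4 in fixed order, all
--     # other keys share rank 5 and fall back to alphabetical comparison.
--     ordered_messages = []
--     for msg in messages:
--         msg = {k: v for k, v in msg.items() if v is not None}
--         keys = sorted(msg, key=lambda k: (_RANK.get(k, len(PRIORITY)), k))
--         ordered_messages.append({k: msg[k] for k in keys})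
--     return ordered_messages
-- ===== Notes on version B (the rewrite author's own statement) =====
-- stated objective: simpler
-- what changed: A builds each ordered dict with two separate key passes (a fixed-order loop over the five priority keys, then a filtered loop over the alphabetically sorted remaining keys); B replaces both passes with one sort of all keys under the composite key (rank, name), where the five priority keys get ranks 0-4 and every other key gets rank 5 and falls back to alphabetical comparison.
import Mathlib
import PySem

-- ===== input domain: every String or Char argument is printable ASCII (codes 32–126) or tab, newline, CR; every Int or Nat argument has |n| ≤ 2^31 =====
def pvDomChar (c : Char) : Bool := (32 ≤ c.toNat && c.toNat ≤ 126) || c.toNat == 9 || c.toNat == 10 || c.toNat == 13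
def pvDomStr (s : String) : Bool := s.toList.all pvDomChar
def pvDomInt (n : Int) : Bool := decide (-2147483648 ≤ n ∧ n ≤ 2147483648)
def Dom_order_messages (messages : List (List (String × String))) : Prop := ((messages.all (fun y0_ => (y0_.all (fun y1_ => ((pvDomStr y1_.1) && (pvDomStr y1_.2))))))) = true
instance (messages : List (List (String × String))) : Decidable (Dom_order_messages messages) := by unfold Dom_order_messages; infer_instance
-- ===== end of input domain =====

-- B replaces A's two key-passes (fixed priority loop + filtered alphabetical loop) by ONE sort of the
-- keys under the composite key (rank, name); objective: simpler. Return-value equivalence only.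

-- ===== PORT A =====
-- the list literal ['role', 'sender', 'content', 'created_at', 'timestamp'] A writes twice
def pvPriorityA : List String := ["role", "sender", "content", "created_at", "timestamp"]

def order_messages (messages : List (List (String × String))) : List (List (String × String)) :=
  messages.map (fun msg0 =>
    -- msg = {k: v for k, v in msg.items() if v is not None}: values are typed str here, never None,
    -- so the filter keeps every item and the comprehension is the dict of msg's items.
    let msg : PySem.Dict String String := PySem.Dict.ofList msg0
    -- for key in [...]: if key in msg: ordered[key] = msg[key]   (msg[key] exact under the guard)
    let ordered : PySem.Dict String String :=
      pvPriorityA.foldl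
        (fun d key => if msg.contains key then d.insert key (msg.getD key "") else d)
        PySem.Dict.empty
    -- for key in sorted(msg.keys()): if key not in [...]: ordered[key] = msg[key]
    let ordered :=
      (PySem.List.sorted msg.keys (fun k => k)).foldl
        (fun d key => if key ∉ pvPriorityA then d.insert key (msg.getD key "") else d)
        ordered
    ordered.items)

-- ===== PORT B =====
-- _RANK = {key: i for i, key in enumerate(PRIORITY)}
def pvRankB : PySem.Dict String Int :=
  PySem.Dict.ofList [("role", 0), ("sender", 1), ("content", 2), ("created_at", 3), ("timestamp", 4)]

-- lambda k: (_RANK.get(k, len(PRIORITY)), k)  — a Python tuple key compares lexicographically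
def pvKeyB (k : String) : Lex (Int × String) := toLex (pvRankB.getD k 5, k)

def order_messages_alt (messages : List (List (String × String))) : List (List (String × String)) :=
  messages.map (fun msg0 =>
    -- msg = {k: v for k, v in msg.items() if v is not None}: values are typed str, the filter keeps all
    let msg : PySem.Dict String String := PySem.Dict.ofList msg0
    -- keys = sorted(msg, key=...); {k: msg[k] for k in keys}  (every k is a key of msg, so msg[k] is exact)
    (PySem.List.sorted msg.keys pvKeyB).map (fun k => (k, msg.getD k "")))

-- ===== PRECONDITION & SPEC =====
def Spec_order_messages (messages : List (List (String × String))) (out : List (List (String × String))) : Prop := out = order_messages_alt messages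
instance (messages : List (List (String × String))) (out : List (List (String × String))) : Decidable (Spec_order_messages messages out) := by unfold Spec_order_messages; infer_instance

-- ===== CLAIM (what is proved, stated in full; the proofs are below) =====
def Claim_equal_order_messages : Prop := ∀ (messages : List (List (String × String))), Dom_order_messages messages → Spec_order_messages messages (order_messages messages)

-- ===== LEMMAS AND PROOFS =====

-- the key order A produces, named: priority keys present (fixed order), then the other keys sorted
def pvKeyListA (m : PySem.Dict String String) : List String :=
  pvPriorityA.filter (fun k => m.contains k) ++
    (PySem.List.sorted m.keys (fun k => k)).filter (fun k => decide (k ∉ pvPriorityA))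

theorem pv_items_foldl_insert (f : String → String) (ks : List String)
    (d : PySem.Dict String String) (hnd : ks.Nodup)
    (hfresh : ∀ k ∈ ks, d.contains k = false) :
    (ks.foldl (fun d k => d.insert k (f k)) d).items = d.items ++ ks.map (fun k => (k, f k)) := by
  induction ks generalizing d with
  | nil => simp
  | cons k ks ih =>
    have hk : d.contains k = false := hfresh k (by simp)
    have hins : (d.insert k (f k)).items = d.items ++ [(k, f k)] := by
      simp [PySem.Dict.insert, hk]
    simp only [List.foldl_cons, List.map_cons]
    rw [ih (d.insert k (f k)) hnd.of_cons, hins]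
    · simp
    · intro k' hk'
      have hne : k' ≠ k := by rintro rfl; exact (List.nodup_cons.mp hnd).1 hk'
      rw [PySem.Dict.contains_insert]
      simp [hne, hfresh k' (by simp [hk'])]

theorem pv_rank_of_not_mem (k : String) (h : k ∉ pvPriorityA) : pvRankB.getD k 5 = 5 := by
  simp [pvPriorityA] at h
  obtain ⟨h1, h2, h3, h4, h5⟩ := h
  have hitems : pvRankB.items =
      [("role", (0:Int)), ("sender", 1), ("content", 2), ("created_at", 3), ("timestamp", 4)] := by
    decide
  have e1 : ("role" == k) = false := beq_eq_false_iff_ne.mpr (Ne.symm h1)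
  have e2 : ("sender" == k) = false := beq_eq_false_iff_ne.mpr (Ne.symm h2)
  have e3 : ("content" == k) = false := beq_eq_false_iff_ne.mpr (Ne.symm h3)
  have e4 : ("created_at" == k) = false := beq_eq_false_iff_ne.mpr (Ne.symm h4)
  have e5 : ("timestamp" == k) = false := beq_eq_false_iff_ne.mpr (Ne.symm h5)
  simp [PySem.Dict.getD, PySem.Dict.get?, hitems, List.find?, e1, e2, e3, e4, e5]

theorem pv_rank_lt_of_mem (k : String) (h : k ∈ pvPriorityA) : pvRankB.getD k 5 < 5 := by
  simp [pvPriorityA] at h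
  rcases h with rfl | rfl | rfl | rfl | rfl <;> decide

theorem pv_keyListA_nodup (m : PySem.Dict String String) (hm : m.keys.Nodup) :
    (pvKeyListA m).Nodup := by
  refine List.Nodup.append (List.Nodup.filter _ (by decide))
    (List.Nodup.filter _ ((PySem.List.sorted_perm m.keys (fun k => k) false).symm.nodup hm)) ?_
  intro a ha hb
  have h1 : a ∈ pvPriorityA := (List.mem_filter.mp ha).1
  have h2 := (List.mem_filter.mp hb).2
  simp at h2
  exact h2 h1

theorem pv_keyListA_perm (m : PySem.Dict String String) (hm : m.keys.Nodup) :
    (pvKeyListA m).Perm m.keys := by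
  rw [List.perm_ext_iff_of_nodup (pv_keyListA_nodup m hm) hm]
  intro k
  by_cases hp : k ∈ pvPriorityA <;>
    simp [pvKeyListA, List.mem_filter, hp, PySem.Dict.contains_iff_mem_keys,
      PySem.List.mem_sorted]

theorem pv_keyListA_pairwise (m : PySem.Dict String String) (hm : m.keys.Nodup) :
    (pvKeyListA m).Pairwise (fun a b => pvKeyB a < pvKeyB b) := by
  rw [pvKeyListA, List.pairwise_append]
  refine ⟨List.Pairwise.filter _ (by decide), ?_, ?_⟩
  · have hs := PySem.List.sorted_pairwise m.keys (fun k => k)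
    have hn : (PySem.List.sorted m.keys (fun k => k) false).Pairwise (· ≠ ·) :=
      ((PySem.List.sorted_perm m.keys (fun k => k) false).symm.nodup hm)
    rw [List.pairwise_filter]
    refine (hs.and hn).imp ?_
    rintro a b ⟨hab, hne⟩ ha hb
    simp only [decide_eq_true_eq] at ha hb
    rw [pvKeyB, pvKeyB, Prod.Lex.toLex_lt_toLex]
    right
    exact ⟨by rw [pv_rank_of_not_mem a ha, pv_rank_of_not_mem b hb], lt_of_le_of_ne hab hne⟩
  · intro a ha b hb
    have hap : a ∈ pvPriorityA := (List.mem_filter.mp ha).1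
    have hbp : b ∉ pvPriorityA := by
      have := (List.mem_filter.mp hb).2; simpa using this
    have h1 := pv_rank_lt_of_mem a hap
    have h2 := pv_rank_of_not_mem b hbp
    rw [pvKeyB, pvKeyB, Prod.Lex.toLex_lt_toLex]
    left; omega

theorem pv_sortedB_eq (m : PySem.Dict String String) (hm : m.keys.Nodup) :
    PySem.List.sorted m.keys pvKeyB = pvKeyListA m :=
  PySem.List.sorted_eq_of_perm_of_pairwise_lt _ _ _
    (pv_keyListA_perm m hm) (pv_keyListA_pairwise m hm)

theorem pv_single (msg0 : List (String × String)) :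
    (let msg : PySem.Dict String String := PySem.Dict.ofList msg0
     let ordered : PySem.Dict String String :=
       pvPriorityA.foldl
         (fun d key => if msg.contains key then d.insert key (msg.getD key "") else d)
         PySem.Dict.empty
     let ordered :=
       (PySem.List.sorted msg.keys (fun k => k)).foldl
         (fun d key => if key ∉ pvPriorityA then d.insert key (msg.getD key "") else d)
         ordered
     ordered.items)
    = (PySem.List.sorted (PySem.Dict.ofList msg0).keys pvKeyB).map
        (fun k => (k, (PySem.Dict.ofList msg0).getD k "")) := by
  have hm : (PySem.Dict.ofList msg0).keys.Nodup := PySem.Dict.nodup_keys_ofList msg0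
  set m : PySem.Dict String String := PySem.Dict.ofList msg0 with hmdef
  show ((PySem.List.sorted m.keys (fun k => k)).foldl
          (fun d key => if key ∉ pvPriorityA then d.insert key (m.getD key "") else d)
          (pvPriorityA.foldl
            (fun d key => if m.contains key then d.insert key (m.getD key "") else d)
            PySem.Dict.empty)).items
      = (PySem.List.sorted m.keys pvKeyB).map (fun k => (k, m.getD k ""))
  rw [pv_sortedB_eq m hm]
  have h2 : (fun (d : PySem.Dict String String) key =>
        if key ∉ pvPriorityA then d.insert key (m.getD key "") else d)
      = (fun d key =>
        if decide (key ∉ pvPriorityA) = true then d.insert key (m.getD key "") else d) := by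
    funext d k
    by_cases h : k ∈ pvPriorityA <;> simp [h]
  rw [h2, ← List.foldl_filter, ← List.foldl_filter, ← List.foldl_append]
  have hL : List.filter m.contains pvPriorityA ++
      List.filter (fun key => decide (key ∉ pvPriorityA)) (PySem.List.sorted m.keys fun k => k)
      = pvKeyListA m := rfl
  rw [hL, pv_items_foldl_insert (fun k => m.getD k "") _ _ (pv_keyListA_nodup m hm)
      (fun k _ => by simp [PySem.Dict.contains, PySem.Dict.empty])]
  simp [pvKeyListA, PySem.Dict.empty]

-- ===== VERDICT (by name: the statement is the Claim_ definition above) =====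
theorem order_messages_spec : Claim_equal_order_messages := by
  intro messages _
  unfold Spec_order_messages order_messages order_messages_alt
  exact List.map_congr_left (fun msg0 _ => pv_single msg0)
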